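-- pv_equiv track=rewrite | github.com/42euge/learning-bench | datasets/novel_algorithm_execution/generate.py | vortex_reduce
-- ===== SOURCE A (Python) =====
-- def vortex_reduce(lst):
--     """Medium: chunk into 3s, rotate within chunk based on sum, take max of each chunk, multiply all."""
--     chunks = []
--     for i in range(0, len(lst), 3):
--         chunks.append(list(lst[i:i+3]))
--     maxes = []
--     for chunk in chunks:
--         if len(chunk) < 2:
--             maxes.append(max(chunk))
--             continue
--         s = sum(chunk)
--         if s > 10:
--             chunk = chunk[1:] + chunk[:1]
--         else:
--             chunk = chunk[-1:] + chunk[:-1]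
--         maxes.append(max(chunk))
--     result = 1
--     for m in maxes:
--         result *= m
--     return result
-- ===== SOURCE B (Python) =====
-- def vortex_reduce(lst):
--     # One fused pass: rotation never changes a chunk's max, so the result is
--     # the product of the max of each consecutive group of 3.
--     result = 1
--     gmax = None
--     for i, x in enumerate(lst):
--         if i % 3 == 0:
--             if gmax is not None:
--                 result *= gmax
--             gmax = x
--         elif x > gmax:
--             gmax = x
--     if gmax is not None:
--         result *= gmax
--     return result
-- ===== Notes on version B (the rewrite author's own statement) =====
-- stated objective: simpler
-- what changed: Replaced the three passes (build chunk lists, rotate each chunk by its sum and take its max, multiply the maxes) by one fused enumerate pass with a running group-max and a running product, using that rotation never changes a chunk's max; no intermediate lists are built.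
import Mathlib
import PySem

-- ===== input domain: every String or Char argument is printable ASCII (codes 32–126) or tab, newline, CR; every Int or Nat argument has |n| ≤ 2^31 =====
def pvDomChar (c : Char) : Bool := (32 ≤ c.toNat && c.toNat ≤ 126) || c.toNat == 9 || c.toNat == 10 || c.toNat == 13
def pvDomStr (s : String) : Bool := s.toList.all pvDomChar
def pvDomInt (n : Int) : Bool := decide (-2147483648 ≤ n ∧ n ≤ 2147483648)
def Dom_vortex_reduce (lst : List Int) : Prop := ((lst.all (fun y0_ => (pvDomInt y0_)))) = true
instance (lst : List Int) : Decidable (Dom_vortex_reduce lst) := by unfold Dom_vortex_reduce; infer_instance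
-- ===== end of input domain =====

-- B fuses A's three passes (chunk, rotate+max, multiply) into one enumerate pass with a
-- running group-max and product; equal because rotating a chunk never changes its max.

-- ===== PORT A =====
-- max(chunk) is only applied to nonempty chunks, so the .getD 0 default is never used.
def vortex_reduce (lst : List Int) : Int :=
  let chunks := (PySem.List.pyRange 0 lst.length 3).foldl
    (fun acc i => acc ++ [PySem.List.slice lst (some i) (some (i + 3))]) []
  let maxes := chunks.foldl
    (fun acc chunk =>
      if chunk.length < 2 then
        acc ++ [(PySem.List.max? chunk (fun y => y)).getD 0]
      else
        let s := chunk.sum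
        let chunk' :=
          if s > 10 then
            PySem.List.slice chunk (some 1) none ++ PySem.List.slice chunk none (some 1)
          else
            PySem.List.slice chunk (some (-1)) none ++ PySem.List.slice chunk none (some (-1))
        acc ++ [(PySem.List.max? chunk' (fun y => y)).getD 0]) []
  maxes.foldl (· * ·) 1

-- ===== PORT B =====
-- loop body of B's for-loop (result, gmax; gmax is an Option since Python starts it at None)
def vrStep (p : Int × Option Int) (ix : Int × Int) : Int × Option Int :=
  if PySem.Int.mod ix.1 3 = 0 then
    (match p.2 with | some g => p.1 * g | none => p.1, some ix.2)
  else
    (p.1, some (match p.2 with | some g => if ix.2 > g then ix.2 else g | none => ix.2))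

-- the final 'if gmax is not None: result *= gmax'
def vrFinish (p : Int × Option Int) : Int :=
  match p.2 with | some g => p.1 * g | none => p.1

def vortex_reduce_alt (lst : List Int) : Int :=
  vrFinish ((PySem.List.enumerate lst 0).foldl vrStep (1, none))

-- ===== PRECONDITION & SPEC =====
def Spec_vortex_reduce (lst : List Int) (out : Int) : Prop := out = vortex_reduce_alt lst
instance (lst : List Int) (out : Int) : Decidable (Spec_vortex_reduce lst out) := by unfold Spec_vortex_reduce; infer_instance

-- ===== CLAIM (what is proved, stated in full; the proofs are below) =====
def Claim_equal_vortex_reduce : Prop := ∀ (lst : List Int), Dom_vortex_reduce lst → Spec_vortex_reduce lst (vortex_reduce lst)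

-- ===== LEMMAS AND PROOFS =====

-- reference value: product of the max of each consecutive group of ≤3 elements
def vrRef : List Int → Int
  | [] => 1
  | [a] => a
  | [a, b] => max a b
  | a :: b :: c :: rest => max (max a b) c * vrRef rest

-- the value A appends to maxes for one chunk
def vrChunkMax (chunk : List Int) : Int :=
  if chunk.length < 2 then
    (PySem.List.max? chunk (fun y => y)).getD 0
  else
    let s := chunk.sum
    let chunk' :=
      if s > 10 then
        PySem.List.slice chunk (some 1) none ++ PySem.List.slice chunk none (some 1)
      else
        PySem.List.slice chunk (some (-1)) none ++ PySem.List.slice chunk none (some (-1))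
    (PySem.List.max? chunk' (fun y => y)).getD 0

-- A as a product over Nat chunk indices
def vrAForm (l : List Int) : Int :=
  ((List.range ((l.length + 2) / 3)).map (fun k => vrChunkMax ((l.drop (3 * k)).take 3))).prod

theorem vrB_inv (lst : List Int) : ∀ (s : Int) (p : Int × Option Int),
    PySem.Int.mod s 3 = 0 →
    vrFinish ((PySem.List.enumerate lst s).foldl vrStep p) = vrFinish p * vrRef lst := by
  have hm : ∀ x : Int, PySem.Int.mod x 3 = x % 3 := fun x =>
    PySem.Int.mod_eq_emod_of_pos (by norm_num)
  induction lst using vrRef.induct with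
  | case1 =>
    intro s p _
    simp [PySem.List.enumerate_nil, vrRef]
  | case2 a =>
    intro s p h
    obtain ⟨r, g⟩ := p
    simp only [PySem.List.enumerate_cons, PySem.List.enumerate_nil, List.foldl_cons,
      List.foldl_nil, vrStep, h, if_pos]
    cases g <;> simp [vrFinish, vrRef]
  | case3 a b =>
    intro s p h
    obtain ⟨r, g⟩ := p
    have h1 : ¬ PySem.Int.mod (s + 1) 3 = 0 := by rw [hm] at h ⊢; omega
    simp only [PySem.List.enumerate_cons, PySem.List.enumerate_nil, List.foldl_cons,
      List.foldl_nil, vrStep, h, h1, if_pos, if_neg, not_false_iff]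
    have hmax : (if b > a then b else a) = max a b := by
      split <;> omega
    cases g <;> simp [vrFinish, vrRef, hmax]
  | case4 a b c rest ih =>
    intro s p h
    obtain ⟨r, g⟩ := p
    have h1 : ¬ PySem.Int.mod (s + 1) 3 = 0 := by rw [hm] at h ⊢; omega
    have h2 : ¬ PySem.Int.mod (s + 1 + 1) 3 = 0 := by rw [hm] at h ⊢; omega
    have h3 : PySem.Int.mod (s + 1 + 1 + 1) 3 = 0 := by rw [hm] at h ⊢; omega
    simp only [PySem.List.enumerate_cons, List.foldl_cons, vrStep, h, h1, h2, if_pos,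
      if_neg, not_false_iff]
    have hmax : (if c > if b > a then b else a then c else if b > a then b else a)
        = max (max a b) c := by
      split_ifs <;> omega
    cases g with
    | none =>
      rw [ih (s + 1 + 1 + 1) _ h3]
      simp [vrFinish, vrRef, hmax]; ring
    | some g0 =>
      rw [ih (s + 1 + 1 + 1) _ h3]
      simp [vrFinish, vrRef, hmax]; ring

theorem vrB_eq (lst : List Int) : vortex_reduce_alt lst = vrRef lst := by
  have h := vrB_inv lst 0 (1, none) (by decide)
  simpa [vortex_reduce_alt, vrFinish] using h

theorem vrA_form (l : List Int) : vortex_reduce l = vrAForm l := by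
  have hfun : (fun (acc : List Int) (chunk : List Int) =>
      if chunk.length < 2 then
        acc ++ [(PySem.List.max? chunk (fun y => y)).getD 0]
      else
        let s := chunk.sum
        let chunk' :=
          if s > 10 then
            PySem.List.slice chunk (some 1) none ++ PySem.List.slice chunk none (some 1)
          else
            PySem.List.slice chunk (some (-1)) none ++ PySem.List.slice chunk none (some (-1))
        acc ++ [(PySem.List.max? chunk' (fun y => y)).getD 0])
      = fun acc chunk => acc ++ [vrChunkMax chunk] := by
    funext acc chunk
    by_cases hc : chunk.length < 2 <;> simp [vrChunkMax, hc]
  unfold vortex_reduce vrAForm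
  simp only [hfun, PySem.List.foldl_append_singleton_eq_map, List.nil_append]
  rw [PySem.List.pyRange_of_pos 0 l.length (by norm_num), ← List.prod_eq_foldl]
  have hcnt : (if (0:Int) < (l.length : Int) then (((l.length : Int) - 0 + 3 - 1) / 3).toNat else 0)
      = (l.length + 2) / 3 := by
    split <;> omega
  rw [hcnt]
  simp only [List.map_map]
  congr 1
  apply List.map_congr_left
  intro k _
  have hcast : (0 : Int) + 3 * (k : Int) = ((3 * k : Nat) : Int) := by push_cast; ring
  have hcast2 : ((3 * k : Nat) : Int) + 3 = ((3 * k + 3 : Nat) : Int) := by push_cast; ring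
  simp only [Function.comp, hcast, hcast2, PySem.List.slice_natCast, Nat.add_sub_cancel_left]

theorem vrChunkMax_one (a : Int) : vrChunkMax [a] = a := by
  simp [vrChunkMax, PySem.List.max?_id_cons]

theorem vrChunkMax_two (a b : Int) : vrChunkMax [a, b] = max a b := by
  unfold vrChunkMax
  simp only [List.length_cons, List.length_nil]
  rw [if_neg (by omega)]
  have h1 : PySem.List.slice [a, b] (some 1) none = [b] := rfl
  have h2 : PySem.List.slice [a, b] none (some 1) = [a] := rfl
  have h3 : PySem.List.slice [a, b] (some (-1)) none = [b] := rfl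
  have h4 : PySem.List.slice [a, b] none (some (-1)) = [a] := rfl
  simp only [h1, h2, h3, h4]
  split <;> simp [PySem.List.max?_id_cons, max_comm]

theorem vrChunkMax_three (a b c : Int) : vrChunkMax [a, b, c] = max (max a b) c := by
  unfold vrChunkMax
  simp only [List.length_cons, List.length_nil]
  rw [if_neg (by omega)]
  have h1 : PySem.List.slice [a, b, c] (some 1) none = [b, c] := rfl
  have h2 : PySem.List.slice [a, b, c] none (some 1) = [a] := rfl
  have h3 : PySem.List.slice [a, b, c] (some (-1)) none = [c] := rfl
  have h4 : PySem.List.slice [a, b, c] none (some (-1)) = [a, b] := rfl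
  simp only [h1, h2, h3, h4]
  split <;>
  · simp only [List.cons_append, List.nil_append, PySem.List.max?_id_cons,
      List.foldl_cons, List.foldl_nil, Option.getD_some]
    apply le_antisymm <;> simp only [max_le_iff, le_max_iff] <;> omega

theorem vrAForm_eq (l : List Int) : vrAForm l = vrRef l := by
  induction l using vrRef.induct with
  | case1 => simp [vrAForm, vrRef]
  | case2 a => simp [vrAForm, vrRef, vrChunkMax_one]
  | case3 a b => simp [vrAForm, vrRef, vrChunkMax_two]
  | case4 a b c rest ih =>
    unfold vrAForm at ih ⊢
    have hlen : ((a :: b :: c :: rest).length + 2) / 3 = (rest.length + 2) / 3 + 1 := by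
      simp only [List.length_cons]; omega
    rw [hlen, List.range_succ_eq_map, List.map_cons, List.prod_cons, List.map_map]
    have hhead : vrChunkMax (((a :: b :: c :: rest).drop (3 * 0)).take 3)
        = max (max a b) c := by
      simp [vrChunkMax_three]
    rw [hhead]
    have htail : ∀ k : Nat, ((a :: b :: c :: rest).drop (3 * Nat.succ k)).take 3
        = (rest.drop (3 * k)).take 3 := by
      intro k
      have hd : (a :: b :: c :: rest).drop (3 * Nat.succ k) = rest.drop (3 * k) := by
        rw [show 3 * Nat.succ k = 3 * k + 1 + 1 + 1 by omega]
        simp [List.drop_succ_cons]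
      rw [hd]
    have hmapeq : (List.range ((rest.length + 2) / 3)).map
          ((fun k => vrChunkMax (((a :: b :: c :: rest).drop (3 * k)).take 3)) ∘ Nat.succ)
        = (List.range ((rest.length + 2) / 3)).map
          (fun k => vrChunkMax ((rest.drop (3 * k)).take 3)) := by
      apply List.map_congr_left
      intro k _
      simp only [Function.comp]
      rw [htail k]
    rw [hmapeq, ih]
    simp [vrRef]


theorem vrA_eq (lst : List Int) : vortex_reduce lst = vrRef lst := by
  rw [vrA_form, vrAForm_eq]

-- ===== VERDICT (by name: the statement is the Claim_ definition above) =====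
theorem vortex_reduce_spec : Claim_equal_vortex_reduce := by
  intro lst _
  unfold Spec_vortex_reduce
  rw [vrA_eq, vrB_eq]
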